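-- pv_equiv track=rewrite | github.com/Kamalabot/HowCompetitive | solution_code/Cow Baseball.py | triplet_sort
-- ===== SOURCE A (Python) =====
-- from typing import List
--
-- def triplet_sort(cows_list :List[int]) -> List[int]:
--     total = 0
--
--     cows_list.sort()
--     n = len(cows_list)
--
--     for i in range(n):
--
--         for j in range(i + 1, n):
--
--             first_diff = cows_list[j] - cows_list[i]
--
--             low = cows_list[j] + first_diff
--             high = cows_list[j] + 2 * first_diff
--
--             left = j + 1
--
--             while left < n and cows_list[left] < low:
--
--                 left = left + 1
--
--             right = left
--
--             while right < n and cows_list[right] <= high: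
--
--                 right = right + 1
--
--
--             total = total + right - left
--
--     return total
-- ===== SOURCE B (Python) =====
-- from typing import List
--
--
-- def _bisect_left(a, x):
--     # first index k with a[k] >= x (a sorted ascending); classic binary search
--     lo, hi = 0, len(a)
--     while lo < hi:
--         mid = (lo + hi) // 2
--         if a[mid] < x:
--             lo = mid + 1
--         else:
--             hi = mid
--     return lo
--
--
-- def _bisect_right(a, x):
--     # first index k with a[k] > x (a sorted ascending)
--     lo, hi = 0, len(a)
--     while lo < hi:
--         mid = (lo + hi) // 2
--         if a[mid] <= x:
--             lo = mid + 1
--         else: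
--             hi = mid
--     return lo
--
--
-- def triplet_sort(cows_list: List[int]) -> List[int]:
--     cows_list.sort()
--     a = cows_list
--     n = len(a)
--     total = 0
--     for i in range(n):
--         for j in range(i + 1, n):
--             d = a[j] - a[i]
--             lo = max(j + 1, _bisect_left(a, a[j] + d))
--             hi = max(lo, _bisect_right(a, a[j] + 2 * d))
--             total += hi - lo
--     return total
-- ===== Notes on version B (the rewrite author's own statement) =====
-- stated objective: faster
-- what changed: The two linear while-scans that find the window [a[j]+d, a[j]+2d] for each pair (i,j) are replaced by binary searches (hand-written bisect_left/bisect_right clamped to j+1), removing the inner linear scans.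
import Mathlib
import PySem

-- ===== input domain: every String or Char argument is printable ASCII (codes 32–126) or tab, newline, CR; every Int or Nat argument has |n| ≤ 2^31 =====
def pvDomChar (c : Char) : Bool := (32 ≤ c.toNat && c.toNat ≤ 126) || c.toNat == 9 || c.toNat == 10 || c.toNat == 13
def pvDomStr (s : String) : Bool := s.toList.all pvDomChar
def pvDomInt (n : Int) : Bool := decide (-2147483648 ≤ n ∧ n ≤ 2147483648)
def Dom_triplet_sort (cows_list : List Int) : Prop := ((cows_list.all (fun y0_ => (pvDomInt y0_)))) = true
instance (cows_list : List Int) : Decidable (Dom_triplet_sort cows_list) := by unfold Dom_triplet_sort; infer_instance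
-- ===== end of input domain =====

-- B replaces A's per-pair linear while-scans by binary searches (bisect) on the sorted list; faster. Both A and B sort the argument in place; the equivalence proved is about the return value.


-- ===== PORT A =====
-- 'while left < n and a[left] < low: left += 1' / 'while right < n and a[right] <= high: right += 1'
-- both are this scan, instantiated with the guard predicate
def pvScan (P : Int → Bool) (a : List Int) (left : Nat) : Nat :=
  if left < a.length ∧ P a[left]! then pvScan P a (left + 1) else left
termination_by a.length - left
decreasing_by omega

def triplet_sort (cows_list : List Int) : Int :=
  let a := PySem.List.sorted cows_list (fun x => x)
  let n := a.length
  (List.range n).foldl (fun total i =>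
    (List.range' (i + 1) (n - (i + 1))).foldl (fun total j =>
      let first_diff := a[j]! - a[i]!
      let low := a[j]! + first_diff
      let high := a[j]! + 2 * first_diff
      let left := pvScan (fun v => decide (v < low)) a (j + 1)
      let right := pvScan (fun v => decide (v ≤ high)) a left
      total + (right : Int) - (left : Int)) total) 0

-- ===== PORT B =====
-- Source B's _bisect_left/_bisect_right are the classic whole-list binary searches = PySem.List.bisectLeft/bisectRight
def triplet_sort_alt (cows_list : List Int) : Int :=
  let a := PySem.List.sorted cows_list (fun x => x)
  let n := a.length
  (List.range n).foldl (fun total i =>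
    (List.range' (i + 1) (n - (i + 1))).foldl (fun total j =>
      let d := a[j]! - a[i]!
      let lo := max (j + 1) (PySem.List.bisectLeft a (a[j]! + d))
      let hi := max lo (PySem.List.bisectRight a (a[j]! + 2 * d))
      total + (hi : Int) - (lo : Int)) total) 0

-- ===== PRECONDITION & SPEC =====
def Spec_triplet_sort (cows_list : List Int) (out : Int) : Prop := out = triplet_sort_alt cows_list
instance (cows_list : List Int) (out : Int) : Decidable (Spec_triplet_sort cows_list out) := by unfold Spec_triplet_sort; infer_instance

-- ===== CLAIM (what is proved, stated in full; the proofs are below) =====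
def Claim_equal_triplet_sort : Prop := ∀ (cows_list : List Int), Dom_triplet_sort cows_list → Spec_triplet_sort cows_list (triplet_sort cows_list)

-- ===== LEMMAS AND PROOFS =====

-- a linear scan stops exactly at the r characterised by: everything before r (from s) satisfies P, and r is the end or fails P
theorem pvScan_eq (P : Int → Bool) (a : List Int) (s r : Nat)
    (hsr : s ≤ r) (hrn : r ≤ a.length)
    (hall : ∀ k, s ≤ k → k < r → P a[k]! = true)
    (hstop : r = a.length ∨ P a[r]! = false) :
    pvScan P a s = r := by
  induction' hd : r - s with m ih generalizing s
  · have hs : s = r := by omega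
    subst hs
    rw [pvScan, if_neg]
    rintro ⟨hlt, hP⟩
    rcases hstop with h | h
    · omega
    · rw [getElem!_pos a s hlt] at h
      rw [getElem!_pos a s hlt] at hP
      simp [h] at hP
  · have hsr' : s < r := by omega
    have hPs : P a[s]! = true := hall s le_rfl hsr'
    rw [pvScan, if_pos ⟨by omega, hPs⟩]
    exact ih (s + 1) (by omega) (fun k hk1 hk2 => hall k (by omega) hk2) (by omega)

theorem scan_left_eq (a : List Int) (x : Int) (s : Nat)
    (hsorted : a.Pairwise (· ≤ ·)) (hs : s ≤ a.length) :
    pvScan (fun v => decide (v < x)) a s = max s (PySem.List.bisectLeft a x) := by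
  obtain ⟨h1, h2, h3⟩ := PySem.List.bisectLeft_spec a x hsorted
  apply pvScan_eq
  · omega
  · omega
  · intro k hk1 hk2
    have hkL : k < PySem.List.bisectLeft a x := by omega
    have hkn : k < a.length := by omega
    rw [getElem!_pos a k hkn]
    simpa using h2 k hkn hkL
  · by_cases hr : max s (PySem.List.bisectLeft a x) = a.length
    · exact Or.inl hr
    · right
      have hrn : max s (PySem.List.bisectLeft a x) < a.length := by omega
      rw [getElem!_pos a _ hrn]
      have := h3 _ hrn (by omega)
      simpa using this

theorem scan_right_eq (a : List Int) (x : Int) (s : Nat)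
    (hsorted : a.Pairwise (· ≤ ·)) (hs : s ≤ a.length) :
    pvScan (fun v => decide (v ≤ x)) a s = max s (PySem.List.bisectRight a x) := by
  obtain ⟨h1, h2, h3⟩ := PySem.List.bisectRight_spec a x hsorted
  apply pvScan_eq
  · omega
  · omega
  · intro k hk1 hk2
    have hkL : k < PySem.List.bisectRight a x := by omega
    have hkn : k < a.length := by omega
    rw [getElem!_pos a k hkn]
    simpa using h2 k hkn hkL
  · by_cases hr : max s (PySem.List.bisectRight a x) = a.length
    · exact Or.inl hr
    · right
      have hrn : max s (PySem.List.bisectRight a x) < a.length := by omega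
      rw [getElem!_pos a _ hrn]
      have := h3 _ hrn (by omega)
      simpa using this

-- ===== VERDICT (by name: the statement is the Claim_ definition above) =====
theorem triplet_sort_spec : Claim_equal_triplet_sort := by
  intro cows_list _
  unfold Spec_triplet_sort triplet_sort triplet_sort_alt
  set a := PySem.List.sorted cows_list (fun x => x) with ha
  have hsorted : a.Pairwise (· ≤ ·) := PySem.List.sorted_pairwise cows_list (fun x => x)
  apply PySem.List.foldl_congr_mem
  intro acc i hi
  apply PySem.List.foldl_congr_mem
  intro acc2 j hj
  have hjn : j < a.length := by
    have := List.mem_range'.mp hj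
    omega
  dsimp only
  have hL := scan_left_eq a (a[j]! + (a[j]! - a[i]!)) (j + 1) hsorted (by omega)
  rw [hL]
  have hB1 : PySem.List.bisectLeft a (a[j]! + (a[j]! - a[i]!)) ≤ a.length :=
    (PySem.List.bisectLeft_spec a _ hsorted).1
  rw [scan_right_eq a (a[j]! + 2 * (a[j]! - a[i]!)) _ hsorted (by omega)]
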